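-- pv_equiv track=rewrite | github.com/zjohnsilver/college-codes | ProgramasPython/hillClimbQueens/Trabalho Final/Trabalho Final/trabalhoFinally.py | caminho_viajantes
-- ===== SOURCE A (Python) =====
-- n_cidades = 20
--
-- def caminho_viajantes(cidades_visitadas, info):
-- 	visitas = []
--
-- 	primeira_cidade = info[0]
-- 	cidade_proxima = info[1]
--
-- 	if primeira_cidade < n_cidades:
-- 		visitas.append(primeira_cidade)
--
-- 	for x in range(1, 4):
-- 		for y, c in enumerate(cidades_visitadas):
-- 			if c==(x) and y!=cidade_proxima and y!=primeira_cidade: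
-- 				visitas.append(y)
--
-- 	if cidade_proxima < n_cidades:
-- 		visitas.append(cidade_proxima)
--
-- 	return visitas
-- ===== SOURCE B (Python) =====
-- n_cidades = 20
--
-- def caminho_viajantes(cidades_visitadas, info):
-- 	primeira_cidade = info[0]
-- 	cidade_proxima = info[1]
-- 	buckets = {1: [], 2: [], 3: []}
-- 	for y, c in enumerate(cidades_visitadas):
-- 		if y != primeira_cidade and y != cidade_proxima and c in buckets:
-- 			buckets[c].append(y)
-- 	head = [primeira_cidade] if primeira_cidade < n_cidades else []
-- 	tail = [cidade_proxima] if cidade_proxima < n_cidades else []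
-- 	return head + buckets[1] + buckets[2] + buckets[3] + tail
-- ===== Notes on version B (the rewrite author's own statement) =====
-- stated objective: alternative
-- what changed: Replaced the triple scan (one full pass over cidades_visitadas per value 1..3) by a single grouping pass that buckets qualifying indices by value, then concatenates head + bucket1 + bucket2 + bucket3 + tail.
import Mathlib
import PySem

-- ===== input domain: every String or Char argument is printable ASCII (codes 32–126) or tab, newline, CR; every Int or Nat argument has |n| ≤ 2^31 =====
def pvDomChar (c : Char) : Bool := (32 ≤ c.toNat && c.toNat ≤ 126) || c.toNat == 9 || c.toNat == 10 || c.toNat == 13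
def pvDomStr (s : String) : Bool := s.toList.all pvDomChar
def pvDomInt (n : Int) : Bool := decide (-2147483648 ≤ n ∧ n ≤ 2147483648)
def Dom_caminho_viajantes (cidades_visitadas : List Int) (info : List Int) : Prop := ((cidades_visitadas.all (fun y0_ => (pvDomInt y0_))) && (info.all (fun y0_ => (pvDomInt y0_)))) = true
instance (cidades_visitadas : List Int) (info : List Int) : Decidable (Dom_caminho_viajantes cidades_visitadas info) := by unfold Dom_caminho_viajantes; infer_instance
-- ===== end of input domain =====

-- B replaces A's triple scan (one pass per value 1..3) by one grouping pass into three buckets (alternative decomposition, same cost).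

-- ===== PORT A =====
-- A's triple scan: for x in 1..3, scan enumerate(cidades_visitadas), appending matching indices.
def caminho_viajantes (cidades_visitadas : List Int) (info : List Int) : List Int :=
  match info with
  | primeira :: proxima :: _ =>
    let visitas : List Int := if primeira < 20 then [primeira] else []
    let visitas := (PySem.List.pyRange 1 4 1).foldl (fun vs x =>
      (PySem.List.enumerate cidades_visitadas).foldl (fun vs' yc =>
        if yc.2 = x ∧ yc.1 ≠ proxima ∧ yc.1 ≠ primeira then vs' ++ [yc.1] else vs') vs) visitas
    if proxima < 20 then visitas ++ [proxima] else visitas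
  | _ => []  -- Python raises IndexError here; excluded by Pre_

-- ===== PORT B =====
-- B's single grouping pass: buckets for values 1, 2, 3, then concatenation.
-- one step of B's grouping loop (the body of Source B's for-loop)
def pvStep (primeira proxima : Int) (b : List Int × List Int × List Int) (yc : Int × Int) :
    List Int × List Int × List Int :=
  if yc.1 ≠ primeira ∧ yc.1 ≠ proxima then
    if yc.2 = 1 then (b.1 ++ [yc.1], b.2.1, b.2.2)
    else if yc.2 = 2 then (b.1, b.2.1 ++ [yc.1], b.2.2)
    else if yc.2 = 3 then (b.1, b.2.1, b.2.2 ++ [yc.1])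
    else b
  else b

def caminho_viajantes_alt (cidades_visitadas : List Int) (info : List Int) : List Int :=
  if 2 ≤ info.length then
    let primeira := info.getD 0 0
    let proxima := info.getD 1 0
    let bs := (PySem.List.enumerate cidades_visitadas).foldl
      (pvStep primeira proxima) ([], [], [])
    (if primeira < 20 then [primeira] else []) ++ bs.1 ++ bs.2.1 ++ bs.2.2 ++
      (if proxima < 20 then [proxima] else [])
  else []  -- Python raises IndexError here; excluded by Pre_

-- ===== PRECONDITION & SPEC =====
-- A does info[0] and info[1]: IndexError (raise) unless info has at least two elements.
def Pre_caminho_viajantes (cidades_visitadas : List Int) (info : List Int) : Prop :=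
  2 ≤ info.length
instance (cidades_visitadas : List Int) (info : List Int) : Decidable (Pre_caminho_viajantes cidades_visitadas info) := by unfold Pre_caminho_viajantes; infer_instance
def pvWitness_caminho_viajantes : List Int × List Int := ([1, 3, 2, 1], [0, 2])

def Spec_caminho_viajantes (cidades_visitadas : List Int) (info : List Int) (out : List Int) : Prop := out = caminho_viajantes_alt cidades_visitadas info
instance (cidades_visitadas : List Int) (info : List Int) (out : List Int) : Decidable (Spec_caminho_viajantes cidades_visitadas info out) := by unfold Spec_caminho_viajantes; infer_instance

-- ===== CLAIM (what is proved, stated in full; the proofs are below) =====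
def Claim_equal_caminho_viajantes : Prop := ∀ (cidades_visitadas : List Int) (info : List Int), Dom_caminho_viajantes cidades_visitadas info → Pre_caminho_viajantes cidades_visitadas info → Spec_caminho_viajantes cidades_visitadas info (caminho_viajantes cidades_visitadas info)

-- ===== LEMMAS AND PROOFS =====

-- indices of pairs in e with value x, excluding indices p and q (ascending order preserved)
def pvSel (p q x : Int) (e : List (Int × Int)) : List Int :=
  (e.filter (fun yc => decide (yc.2 = x ∧ yc.1 ≠ q ∧ yc.1 ≠ p))).map (fun yc => yc.1)

theorem pvSel_cons (p q x : Int) (yc : Int × Int) (e : List (Int × Int)) :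
    pvSel p q x (yc :: e) =
      (if yc.2 = x ∧ yc.1 ≠ q ∧ yc.1 ≠ p then [yc.1] else []) ++ pvSel p q x e := by
  simp only [pvSel, List.filter_cons]
  split_ifs with h <;> simp_all

-- A's inner scan for one value x equals acc ++ pvSel
theorem a_inner (p q x : Int) (e : List (Int × Int)) (acc : List Int) :
    e.foldl (fun vs' yc =>
        if yc.2 = x ∧ yc.1 ≠ q ∧ yc.1 ≠ p then vs' ++ [yc.1] else vs') acc
      = acc ++ pvSel p q x e := by
  induction e generalizing acc with
  | nil => simp [pvSel]
  | cons yc e ih =>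
    rw [List.foldl_cons, ih, pvSel_cons]
    split_ifs <;> simp

-- B's single grouping pass computes the three selections at once
theorem b_fold (p q : Int) (e : List (Int × Int)) (b : List Int × List Int × List Int) :
    e.foldl (pvStep p q) b
      = (b.1 ++ pvSel p q 1 e, b.2.1 ++ pvSel p q 2 e, b.2.2 ++ pvSel p q 3 e) := by
  induction e generalizing b with
  | nil => simp [pvSel]
  | cons yc e ih =>
    rw [List.foldl_cons, ih, pvSel_cons, pvSel_cons, pvSel_cons]
    unfold pvStep
    by_cases hp : yc.1 = p
    · simp [hp]
    · by_cases hq : yc.1 = q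
      · simp [hq]
      · by_cases h1 : yc.2 = 1
        · simp [hp, hq, h1]
        · by_cases h2 : yc.2 = 2
          · simp [hp, hq, h2]
          · by_cases h3 : yc.2 = 3
            · simp [hp, hq, h3]
            · simp [hp, hq, h1, h2, h3]

-- ===== VERDICT (by name: the statement is the Claim_ definition above) =====
theorem caminho_viajantes_spec : Claim_equal_caminho_viajantes := by
  intro cv info _ hpre
  unfold Spec_caminho_viajantes caminho_viajantes caminho_viajantes_alt
  match info with
  | [] => simp [Pre_caminho_viajantes] at hpre
  | [_] => simp [Pre_caminho_viajantes] at hpre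
  | p :: q :: rest =>
    simp only [List.length_cons]
    rw [if_pos (by omega : 2 ≤ rest.length + 1 + 1)]
    simp only [List.getD, List.getElem?_cons_zero, List.getElem?_cons_succ, Option.getD_some]
    have hr : PySem.List.pyRange 1 4 1 = [1, 2, 3] := by decide
    rw [hr]
    simp only [List.foldl_cons, List.foldl_nil]
    rw [a_inner, a_inner, a_inner, b_fold]
    split_ifs <;> simp
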